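-- pv_equiv track=rewrite | github.com/lesc-ufv/fdam | fdam-hw-generator/src/common/utils.py | make_tree_array
-- ===== SOURCE A (Python) =====
-- def make_tree_array(radix, num_input, array):
--     if radix < 2:
--         return [[num_input]]
--     m_array = []
--     while num_input > radix:
--         m_array.append(radix)
--         num_input = num_input - radix
--     else:
--         m_array.append(num_input)
--
--     array.append(m_array)
--     if len(m_array) == 1:
--         return array
--     else:
--         return make_tree_array(radix, len(m_array), array)
-- ===== SOURCE B (Python) =====
-- def make_tree_array(radix, num_input, array):
--     # Iterative version; each level is computed in closed form with a
--     # floor division instead of by repeated subtraction. Mutates `array`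
--     # in place (appends the levels) and returns it, like the original.
--     if radix < 2:
--         return [[num_input]]
--     n = num_input
--     while True:
--         if n > radix:
--             k = (n - 1) // radix
--             level = [radix] * k + [n - k * radix]
--         else:
--             level = [n]
--         array.append(level)
--         if len(level) == 1:
--             return array
--         n = len(level)
-- ===== Notes on version B (the rewrite author's own statement) =====
-- stated objective: alternative
-- what changed: Replaced the self-recursion and the repeated-subtraction inner loop by a single iterative while-loop that builds each level in closed form ([radix]*k + [n-k*radix] with k=(n-1)//radix) instead of subtracting radix one step at a time.
import Mathlib
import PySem

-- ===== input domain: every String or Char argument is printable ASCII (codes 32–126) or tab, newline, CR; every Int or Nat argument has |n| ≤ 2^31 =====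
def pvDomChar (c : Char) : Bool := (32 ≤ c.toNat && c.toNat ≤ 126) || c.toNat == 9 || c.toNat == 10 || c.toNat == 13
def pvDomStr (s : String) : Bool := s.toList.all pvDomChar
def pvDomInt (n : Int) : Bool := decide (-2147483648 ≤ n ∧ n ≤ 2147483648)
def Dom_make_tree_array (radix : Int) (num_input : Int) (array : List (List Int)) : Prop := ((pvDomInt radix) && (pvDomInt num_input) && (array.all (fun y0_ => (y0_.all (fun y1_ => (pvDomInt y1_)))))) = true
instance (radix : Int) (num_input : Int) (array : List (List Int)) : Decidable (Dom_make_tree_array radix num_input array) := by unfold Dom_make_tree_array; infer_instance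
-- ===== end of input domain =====

-- B replaces A's recursion and repeated-subtraction inner loop by an iterative
-- loop whose levels are built in closed form with one floor division each;
-- equivalence is about the RETURN value (both Pythons also append the same
-- levels to `array` in place).  The `fuel` arguments only make the recursions
-- structural; they are provably never exhausted when radix ≥ 2.

-- ===== PORT A =====
-- the `while num_input > radix` loop building m_array by repeated subtraction
def mkLevelA (radix : Int) (fuel : Nat) (n : Int) : List Int :=
  match fuel with
  | 0 => [n]
  | fuel + 1 => if radix < n then radix :: mkLevelA radix fuel (n - radix) else [n]

-- A's self-recursion: build m_array, append it, stop iff it has one element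
def treeA (radix : Int) (fuel : Nat) (num_input : Int) (array : List (List Int)) : List (List Int) :=
  match fuel with
  | 0 => array
  | fuel + 1 =>
    let m := mkLevelA radix num_input.toNat num_input
    if m.length = 1 then array ++ [m]
    else treeA radix fuel (m.length : Int) (array ++ [m])

def make_tree_array (radix : Int) (num_input : Int) (array : List (List Int)) : List (List Int) :=
  if radix < 2 then [[num_input]]
  else treeA radix (num_input.toNat + 1) num_input array

-- ===== PORT B =====
-- one level in closed form: [radix] * k + [n - k*radix] with k = (n-1)//radix
def mkLevelB (radix : Int) (n : Int) : List Int :=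
  if radix < n then
    List.replicate ((PySem.Int.floordiv (n - 1) radix).toNat) radix
      ++ [n - (PySem.Int.floordiv (n - 1) radix) * radix]
  else [n]

-- B's `while True` loop: append the closed-form level, stop iff it is a singleton
def bLoop (radix : Int) (fuel : Nat) (n : Int) (array : List (List Int)) : List (List Int) :=
  match fuel with
  | 0 => array
  | fuel + 1 =>
    if (mkLevelB radix n).length = 1 then array ++ [mkLevelB radix n]
    else bLoop radix fuel ((mkLevelB radix n).length : Int) (array ++ [mkLevelB radix n])

def make_tree_array_alt (radix : Int) (num_input : Int) (array : List (List Int)) : List (List Int) :=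
  if radix < 2 then [[num_input]]
  else bLoop radix (num_input.toNat + 1) num_input array

-- ===== PRECONDITION & SPEC =====
def Spec_make_tree_array (radix : Int) (num_input : Int) (array : List (List Int)) (out : List (List Int)) : Prop := out = make_tree_array_alt radix num_input array
instance (radix : Int) (num_input : Int) (array : List (List Int)) (out : List (List Int)) : Decidable (Spec_make_tree_array radix num_input array out) := by unfold Spec_make_tree_array; infer_instance

-- ===== CLAIM (what is proved, stated in full; the proofs are below) =====
def Claim_equal_make_tree_array : Prop := ∀ (radix : Int) (num_input : Int) (array : List (List Int)), Dom_make_tree_array radix num_input array → Spec_make_tree_array radix num_input array (make_tree_array radix num_input array)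

-- ===== LEMMAS AND PROOFS =====

-- the closed-form level satisfies the same recurrence as A's subtraction loop
theorem mkLevelB_step (radix : Int) (h : 2 ≤ radix) (n : Int) (hn : radix < n) :
    mkLevelB radix n = radix :: mkLevelB radix (n - radix) := by
  have h0 : (0 : Int) < radix := by omega
  have hk : PySem.Int.floordiv (n - 1) radix * radix ≤ n - 1 ∧
      n - 1 < (PySem.Int.floordiv (n - 1) radix + 1) * radix :=
    (PySem.Int.floordiv_eq_iff_of_pos h0).mp rfl
  have hk1 : 1 ≤ PySem.Int.floordiv (n - 1) radix := by
    rw [PySem.Int.le_floordiv_iff_mul_le h0]; omega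
  by_cases hc : radix < n - radix
  · have hk' : PySem.Int.floordiv (n - radix - 1) radix = PySem.Int.floordiv (n - 1) radix - 1 := by
      rw [PySem.Int.floordiv_eq_iff_of_pos h0]
      constructor <;> nlinarith [hk.1, hk.2]
    rw [mkLevelB, if_pos hn, mkLevelB, if_pos hc, hk']
    have hnat : (PySem.Int.floordiv (n - 1) radix).toNat
        = (PySem.Int.floordiv (n - 1) radix - 1).toNat + 1 := by omega
    have hv : n - PySem.Int.floordiv (n - 1) radix * radix
        = n - radix - (PySem.Int.floordiv (n - 1) radix - 1) * radix := by ring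
    rw [hnat, List.replicate_succ, List.cons_append, hv]
  · have hk2 : PySem.Int.floordiv (n - 1) radix = 1 := by
      rw [PySem.Int.floordiv_eq_iff_of_pos h0]
      constructor <;> omega
    rw [mkLevelB, if_pos hn, mkLevelB, if_neg hc, hk2]
    norm_num

-- A's subtraction loop computes the closed-form level whenever fuel suffices
theorem mkLevelA_eq (radix : Int) (h : 2 ≤ radix) :
    ∀ (fuel : Nat) (n : Int), n ≤ radix + fuel * radix →
      mkLevelA radix fuel n = mkLevelB radix n := by
  intro fuel
  induction fuel with
  | zero =>
    intro n hf
    rw [mkLevelA, mkLevelB, if_neg (by omega)]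
  | succ fuel ih =>
    intro n hf
    rw [mkLevelA]
    by_cases hn : radix < n
    · rw [if_pos hn, ih (n - radix) (by push_cast at hf ⊢; linarith),
        mkLevelB_step radix h n hn]
    · rw [if_neg hn, mkLevelB, if_neg hn]

-- the fuel num_input.toNat always suffices for the inner loop when 2 ≤ radix
theorem fuel_ok (radix : Int) (h : 2 ≤ radix) (n : Int) : n ≤ radix + n.toNat * radix := by
  by_cases hp : 0 < n
  · have : (n.toNat : Int) = n := by omega
    nlinarith [this]
  · have : (0 : Int) ≤ n.toNat * radix := by positivity
    omega

theorem tree_eq (radix : Int) (h : 2 ≤ radix) :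
    ∀ (fuel : Nat) (n : Int) (array : List (List Int)),
      treeA radix fuel n array = bLoop radix fuel n array := by
  intro fuel
  induction fuel with
  | zero => intro n array; rw [treeA, bLoop]
  | succ fuel ih =>
    intro n array
    rw [treeA, bLoop]
    simp only [mkLevelA_eq radix h n.toNat n (fuel_ok radix h n)]
    by_cases hm : (mkLevelB radix n).length = 1
    · rw [if_pos hm, if_pos hm]
    · rw [if_neg hm, if_neg hm, ih]

-- ===== VERDICT (by name: the statement is the Claim_ definition above) =====
theorem make_tree_array_spec : Claim_equal_make_tree_array := by
  intro radix num_input array _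
  unfold Spec_make_tree_array make_tree_array make_tree_array_alt
  by_cases hr : radix < 2
  · rw [if_pos hr, if_pos hr]
  · rw [if_neg hr, if_neg hr]
    exact tree_eq radix (by omega) (num_input.toNat + 1) num_input array
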